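-- pv_equiv track=rewrite | github.com/sw-lgtm/32_group | 32_code/32_Software/map/mapupdate.py | _find_valid_columns
-- ===== SOURCE A (Python) =====
-- from typing import List, Tuple, Optional
--
-- def _find_valid_columns(grid: List[List[int]],
--                         y_min: int, y_max: int) -> Tuple[Optional[int], Optional[int]]:
--     """
--     Find the column boundaries within valid row range
--     """
--     width = len(grid[0])
--
--     # Sampling rows
--     sample_rows = []
--     step = max(1, (y_max - y_min) // 4)
--     for y in range(y_min, y_max + 1, step):
--         sample_rows.append(y)
--     if y_max not in sample_rows:
--         sample_rows.append(y_max)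
--
--     x_min = width
--     x_max = -1
--
--     for y in sample_rows:
--         row = grid[y]
--         # Scan from left to right
--         for x in range(width):
--             if row[x] <= 30:
--                 x_min = min(x_min, x)
--                 break
--
--         # Scan from right to left
--         for x in range(width - 1, -1, -1):
--             if row[x] <= 30:
--                 x_max = max(x_max, x)
--                 break
--
--     if x_max < x_min:
--         return None, None
--
--     return x_min, x_max
-- ===== SOURCE B (Python) =====
-- from typing import List, Tuple, Optional
--
-- def _find_valid_columns(grid: List[List[int]],
--                         y_min: int, y_max: int) -> Tuple[Optional[int], Optional[int]]:
--     """
--     Find the column boundaries within valid row range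
--     """
--     width = len(grid[0])
--
--     # Sampling rows (same sampling as before)
--     sample_rows = []
--     step = max(1, (y_max - y_min) // 4)
--     for y in range(y_min, y_max + 1, step):
--         sample_rows.append(y)
--     if y_max not in sample_rows:
--         sample_rows.append(y_max)
--
--     # One pass: collect every matching column index of every sampled row.
--     hits = [x for y in sample_rows for x in range(width) if grid[y][x] <= 30]
--     if not hits:
--         return None, None
--     return min(hits), max(hits)
-- ===== Notes on version B (the rewrite author's own statement) =====
-- stated objective: simpler
-- what changed: Replaced the per-row left-to-right and right-to-left break scans with sentinel min/max accumulators by one flat comprehension collecting every matching column index of every sampled row, returning (min(hits), max(hits)) or (None, None) if there are no hits.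
import Mathlib
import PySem

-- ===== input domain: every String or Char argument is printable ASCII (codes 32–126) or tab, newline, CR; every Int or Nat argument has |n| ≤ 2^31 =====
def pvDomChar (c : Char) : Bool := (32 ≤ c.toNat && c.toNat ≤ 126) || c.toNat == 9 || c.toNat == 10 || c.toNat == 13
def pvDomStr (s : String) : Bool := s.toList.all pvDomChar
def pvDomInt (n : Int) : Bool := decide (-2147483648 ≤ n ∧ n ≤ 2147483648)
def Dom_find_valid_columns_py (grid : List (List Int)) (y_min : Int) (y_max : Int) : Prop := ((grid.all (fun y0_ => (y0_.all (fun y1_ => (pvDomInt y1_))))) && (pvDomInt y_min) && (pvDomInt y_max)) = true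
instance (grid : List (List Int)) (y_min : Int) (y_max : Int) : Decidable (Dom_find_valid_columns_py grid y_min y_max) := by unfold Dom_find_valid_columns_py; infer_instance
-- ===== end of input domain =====

-- B replaces A's per-row left/right break scans with sentinel accumulators by one flat
-- collection of all matching column indices and a single min/max of it (simpler decomposition).


-- ===== PORT A =====
-- sample-row construction (identical, line for line, in Source A and Source B; shared helper)
def pvSampleRows (y_min : Int) (y_max : Int) : List Int :=
  let step := max 1 (PySem.Int.floordiv (y_max - y_min) 4)
  let s := PySem.List.pyRange y_min (y_max + 1) step
  if y_max ∈ s then s else s ++ [y_max]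

-- 'for x in xs: if p x: <use x>; break' — first x in xs with p x
def pvFirstHit (p : Int → Bool) : List Int → Option Int
  | [] => none
  | x :: rest => if p x then some x else pvFirstHit p rest

def find_valid_columns_py (grid : List (List Int)) (y_min : Int) (y_max : Int) : Option Int × Option Int :=
  let width : Int := (((PySem.List.pyGet? grid 0).getD []).length : Int)
  let st := (pvSampleRows y_min y_max).foldl (fun (st : Int × Int) y =>
      let row := (PySem.List.pyGet? grid y).getD []
      let xmin := match pvFirstHit (fun x => PySem.List.pyGetD row x 31 ≤ 30)
                        (PySem.List.pyRange 0 width 1) with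
                  | some x => min st.1 x
                  | none => st.1
      let xmax := match pvFirstHit (fun x => PySem.List.pyGetD row x 31 ≤ 30)
                        (PySem.List.pyRange (width - 1) (-1) (-1)) with
                  | some x => max st.2 x
                  | none => st.2
      (xmin, xmax)) (width, -1)
  if st.2 < st.1 then (none, none) else (some st.1, some st.2)

-- ===== PORT B =====
def find_valid_columns_py_alt (grid : List (List Int)) (y_min : Int) (y_max : Int) : Option Int × Option Int :=
  let width : Int := (((PySem.List.pyGet? grid 0).getD []).length : Int)
  let hits := (pvSampleRows y_min y_max).flatMap (fun y =>
      let row := (PySem.List.pyGet? grid y).getD []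
      (PySem.List.pyRange 0 width 1).filter (fun x => PySem.List.pyGetD row x 31 ≤ 30))
  match PySem.List.min? hits (fun x => x), PySem.List.max? hits (fun x => x) with
  | some m, some M => (some m, some M)
  | _, _ => (none, none)

-- ===== PRECONDITION & SPEC =====
-- Pre_ excludes exactly the inputs on which the Python A raises an IndexError: an empty grid,
-- a sampled row index outside [-len(grid), len(grid)), or (width > 0) a sampled row shorter than width.
def Pre_find_valid_columns_py (grid : List (List Int)) (y_min : Int) (y_max : Int) : Prop :=
  grid ≠ [] ∧
  ∀ y ∈ pvSampleRows y_min y_max,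
    (-(grid.length : Int) ≤ y ∧ y < (grid.length : Int)) ∧
    (((PySem.List.pyGet? grid 0).getD []).length = 0 ∨
     ((PySem.List.pyGet? grid 0).getD []).length ≤ ((PySem.List.pyGet? grid y).getD []).length)
instance (grid : List (List Int)) (y_min : Int) (y_max : Int) : Decidable (Pre_find_valid_columns_py grid y_min y_max) := by unfold Pre_find_valid_columns_py; infer_instance

def pvWitness_find_valid_columns_py : List (List Int) × Int × Int := ([[31, 20], [5, 40]], 0, 1)

def Spec_find_valid_columns_py (grid : List (List Int)) (y_min : Int) (y_max : Int) (out : Option Int × Option Int) : Prop := out = find_valid_columns_py_alt grid y_min y_max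
instance (grid : List (List Int)) (y_min : Int) (y_max : Int) (out : Option Int × Option Int) : Decidable (Spec_find_valid_columns_py grid y_min y_max out) := by unfold Spec_find_valid_columns_py; infer_instance

-- ===== CLAIM (what is proved, stated in full; the proofs are below) =====
def Claim_equal_find_valid_columns_py : Prop := ∀ (grid : List (List Int)) (y_min : Int) (y_max : Int), Dom_find_valid_columns_py grid y_min y_max → Pre_find_valid_columns_py grid y_min y_max → Spec_find_valid_columns_py grid y_min y_max (find_valid_columns_py grid y_min y_max)

-- ===== LEMMAS AND PROOFS =====

theorem pvFirstHit_eq_head_filter (p : Int → Bool) (xs : List Int) :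
    pvFirstHit p xs = (xs.filter p).head? := by
  induction xs with
  | nil => rfl
  | cons x rest ih =>
    by_cases h : p x <;> simp [pvFirstHit, h, ih]

theorem pvFoldl_min_of_le (t : List Int) (c : Int) (h : ∀ y ∈ t, c ≤ y) :
    t.foldl min c = c := by
  induction t with
  | nil => rfl
  | cons x rest ih =>
    have hx : min c x = c := min_eq_left (h x (by simp))
    simpa [hx] using ih (fun y hy => h y (by simp [hy]))

theorem pvHead_min (l : List Int) (hl : l.Pairwise (· ≤ ·)) (a : Int) :
    (match l.head? with | some x => min a x | none => a) = l.foldl min a := by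
  cases l with
  | nil => rfl
  | cons x t =>
    have hx : ∀ y ∈ t, x ≤ y := (List.pairwise_cons.mp hl).1
    simp only [List.head?_cons, List.foldl_cons]
    rw [pvFoldl_min_of_le t (min a x) (fun y hy => le_trans (min_le_right a x) (hx y hy))]

theorem pvLast_max (l : List Int) (hl : l.Pairwise (· ≤ ·)) (a : Int) :
    (match l.getLast? with | some x => max a x | none => a) = l.foldl max a := by
  induction l generalizing a with
  | nil => rfl
  | cons x t ih =>
    cases t with
    | nil => simp [List.getLast?]
    | cons z t' =>
      have ht : (z :: t').Pairwise (· ≤ ·) := (List.pairwise_cons.mp hl).2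
      have hx : ∀ y ∈ z :: t', x ≤ y := (List.pairwise_cons.mp hl).1
      have hmem : ∀ L, (z :: t').getLast? = some L → L ∈ z :: t' := by
        intro L hL
        exact List.mem_of_getLast? hL
      have := ih ht (max a x)
      rw [List.getLast?_cons_cons, List.foldl_cons, ← ih ht (max a x)]
      cases hL : (z :: t').getLast? with
      | none => simp at hL
      | some L =>
        have hxL : x ≤ L := hx L (hmem L hL)
        simp [max_assoc, max_eq_right hxL]

theorem pvFold_pair (H : Int → List Int) (hs : ∀ y, (H y).Pairwise (· ≤ ·)) :
    ∀ (rows : List Int) (a b : Int),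
      rows.foldl (fun (st : Int × Int) y =>
        (match (H y).head? with | some x => min st.1 x | none => st.1,
         match (H y).getLast? with | some x => max st.2 x | none => st.2)) (a, b)
      = ((rows.flatMap H).foldl min a, (rows.flatMap H).foldl max b) := by
  intro rows
  induction rows with
  | nil => intro a b; rfl
  | cons y ys ih =>
    intro a b
    simp only [List.foldl_cons, List.flatMap_cons, List.foldl_append]
    rw [pvHead_min (H y) (hs y) a, pvLast_max (H y) (hs y) b, ih]

theorem pvRange_rev (W : Int) :
    PySem.List.pyRange (W - 1) (-1) (-1) = (PySem.List.pyRange 0 W 1).reverse := by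
  rw [PySem.List.pyRange_neg_one_eq_reverse]
  norm_num

theorem find_valid_columns_eq (grid : List (List Int)) (y_min : Int) (y_max : Int) :
    find_valid_columns_py grid y_min y_max = find_valid_columns_py_alt grid y_min y_max := by
  unfold find_valid_columns_py find_valid_columns_py_alt
  dsimp only
  set W : Int := (((PySem.List.pyGet? grid 0).getD []).length : Int) with hW
  have hW0 : 0 ≤ W := by positivity
  set H : Int → List Int := fun y =>
    (PySem.List.pyRange 0 W 1).filter
      (fun x => PySem.List.pyGetD ((PySem.List.pyGet? grid y).getD []) x 31 ≤ 30) with hH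
  have hs : ∀ y, (H y).Pairwise (· ≤ ·) := by
    intro y
    exact ((PySem.List.pairwise_lt_pyRange_one 0 W).filter _).imp (fun h => le_of_lt h)
  have hfun : (fun (st : Int × Int) y =>
      let row := (PySem.List.pyGet? grid y).getD []
      let xmin := match pvFirstHit (fun x => PySem.List.pyGetD row x 31 ≤ 30)
                        (PySem.List.pyRange 0 W 1) with
                  | some x => min st.1 x
                  | none => st.1
      let xmax := match pvFirstHit (fun x => PySem.List.pyGetD row x 31 ≤ 30)
                        (PySem.List.pyRange (W - 1) (-1) (-1)) with
                  | some x => max st.2 x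
                  | none => st.2
      ((xmin, xmax) : Int × Int)) =
      (fun (st : Int × Int) y =>
        (match (H y).head? with | some x => min st.1 x | none => st.1,
         match (H y).getLast? with | some x => max st.2 x | none => st.2)) := by
    funext st y
    simp only [pvFirstHit_eq_head_filter, pvRange_rev, List.filter_reverse,
      List.head?_reverse, hH]
  rw [hfun, pvFold_pair H hs (pvSampleRows y_min y_max) W (-1)]
  set hits := (pvSampleRows y_min y_max).flatMap H with hhits
  have hmemW : ∀ x ∈ hits, 0 ≤ x ∧ x < W := by
    intro x hx
    rcases List.mem_flatMap.mp hx with ⟨y, _, hy⟩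
    exact (PySem.List.mem_pyRange_one).mp (List.mem_of_mem_filter hy)
  cases hhits' : hits with
  | nil =>
    simp only [List.foldl_nil, PySem.List.min?, PySem.List.max?]
    have : (-1 : Int) < W := by omega
    simp [this]
  | cons h t =>
    have hmem : ∀ x ∈ h :: t, 0 ≤ x ∧ x < W := by rw [← hhits']; exact hmemW
    have hh : 0 ≤ h ∧ h < W := hmem h (by simp)
    simp only [List.foldl_cons,
      PySem.List.min?_id_cons, PySem.List.max?_id_cons]
    have h1 : min W h = h := min_eq_right (le_of_lt hh.2)
    have h2 : max (-1 : Int) h = h := max_eq_right (by omega)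
    rw [h1, h2]
    have hle : t.foldl min h ≤ t.foldl max h :=
      le_trans (PySem.List.foldl_min_le t h).1 (PySem.List.le_foldl_max t h).1
    simp [not_lt.mpr hle]

-- ===== VERDICT (by name: the statement is the Claim_ definition above) =====
theorem find_valid_columns_py_spec : Claim_equal_find_valid_columns_py := by
  intro grid y_min y_max _ _
  unfold Spec_find_valid_columns_py
  exact find_valid_columns_eq grid y_min y_max
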